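-- pv_equiv track=rewrite | github.com/humancipher/Programming_Contest | Programming_Contest/AtCoder/AGC/AGC_010-019/AGC_016/AGC_016_A.py | solve
-- ===== SOURCE A (Python) =====
-- def solve(S,a,r): #(S,a,r) = (現在の文字列,狙う単一文字,再帰回数)
--     if len(set(S)) == 1:
--         return r
--     else:
--         T = ""
--         for i in range(len(S)-1):
--             if S[i] == a or S[i+1] == a:
--                 T += a
--             else:
--                 T += S[i+1]
--         return solve(T,a,r+1)
-- ===== SOURCE B (Python) =====
-- def solve(S, a, r):
--     # Closed form: if the target char occurs, the answer is r + length of the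
--     # longest run of non-target characters; otherwise r + smallest k with S[k:] constant.
--     n = len(S)
--     if len(a) == 1 and a in S:
--         best = cur = 0
--         for ch in S:
--             if ch == a:
--                 cur = 0
--             else:
--                 cur += 1
--                 if cur > best:
--                     best = cur
--         return r + best
--     k = n - 1
--     while k > 0 and S[k - 1] == S[k]:
--         k -= 1
--     return r + k
-- ===== Notes on version B (the rewrite author's own statement) =====
-- stated objective: faster
-- what changed: A repeatedly rewrites the whole string (one pass per recursion level) until it is uniform; B computes the answer in closed form with a single linear scan: r plus the longest run of non-target characters when the one-char target occurs in S, otherwise r plus the smallest k such that S[k:] is constant (one backward scan).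
-- outside the precondition, e.g. on solve('', 'a', 0): A raises RecursionError, B returns -1
import Mathlib
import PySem

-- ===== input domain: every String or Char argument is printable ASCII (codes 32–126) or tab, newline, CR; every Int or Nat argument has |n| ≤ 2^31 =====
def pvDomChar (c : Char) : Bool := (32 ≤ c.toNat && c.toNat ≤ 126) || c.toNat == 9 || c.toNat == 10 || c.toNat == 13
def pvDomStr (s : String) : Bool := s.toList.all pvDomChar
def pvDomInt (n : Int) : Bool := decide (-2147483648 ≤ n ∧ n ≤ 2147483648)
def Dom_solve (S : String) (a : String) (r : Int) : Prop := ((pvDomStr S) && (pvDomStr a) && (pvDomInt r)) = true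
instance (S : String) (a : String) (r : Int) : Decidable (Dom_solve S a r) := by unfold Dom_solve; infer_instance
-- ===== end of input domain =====

-- B replaces A's repeated whole-string rewriting with a closed form computed in one pass:
-- the longest run of non-target characters (target present), else a backward scan for the
-- smallest k with S[k:] constant.

-- ===== PORT A =====
-- pvStep is a proof-side description of one rewriting pass of A; it is proved equal to
-- A's fold (pvBridge) so that the recursion in `solveAuxA` can be shown terminating.
def pvStep (a : String) : List Char → List Char
  | x :: y :: t => (if [x] = a.toList ∨ [y] = a.toList then a.toList.headD y else y) :: pvStep a (y :: t)
  | _ => []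

theorem pvStep_length (a : String) (s : List Char) : (pvStep a s).length = s.length - 1 := by
  induction s with
  | nil => rfl
  | cons x t ih =>
    cases t with
    | nil => rfl
    | cons y t' => simp [pvStep] at ih ⊢; omega

theorem pvFoldlChunk (f : Int → List Char) (l : List Int) (acc : List Char) :
    l.foldl (fun acc i => acc ++ f i) acc = acc ++ l.flatMap f := by
  induction l generalizing acc with
  | nil => simp
  | cons i l ih => simp [List.foldl_cons, ih]

theorem pvBridgeAux (a : String) (s : List Char) :
    (List.range (s.length - 1)).flatMap
      (fun k => if [s.getD k ' '] = a.toList ∨ [s.getD (k + 1) ' '] = a.toList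
                then a.toList else [s.getD (k + 1) ' ']) = pvStep a s := by
  induction s with
  | nil => rfl
  | cons x t ih =>
    cases t with
    | nil => rfl
    | cons y t' =>
      have hlen : (x :: y :: t').length - 1 = ((y :: t').length - 1) + 1 := by simp
      rw [hlen, List.range_succ_eq_map, List.flatMap_cons, List.flatMap_map]
      have hfun : (fun k : Nat => if [(x :: y :: t').getD k.succ ' '] = a.toList ∨
                      [(x :: y :: t').getD (k.succ + 1) ' '] = a.toList
                    then a.toList else [(x :: y :: t').getD (k.succ + 1) ' ']) =
          (fun k => if [(y :: t').getD k ' '] = a.toList ∨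
                      [(y :: t').getD (k + 1) ' '] = a.toList
                    then a.toList else [(y :: t').getD (k + 1) ' ']) := by
        funext k
        simp [Nat.succ_eq_add_one]
      rw [hfun, ih]
      show (if [x] = a.toList ∨ [y] = a.toList then a.toList else [y]) ++ pvStep a (y :: t') =
        pvStep a (x :: y :: t')
      by_cases hcond : [x] = a.toList ∨ [y] = a.toList
      · rcases hcond with h | h
        · simp [pvStep, ← h]
        · simp [pvStep, ← h]
      · simp [pvStep, hcond]

-- bridge: A's fold over range(len(S)-1) builds exactly pvStep a s
theorem pvBridge (a : String) (s : List Char) :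
    (PySem.List.pyRange 0 ((s.length : Int) - 1) 1).foldl
      (fun acc i =>
        if [PySem.List.pyGetD s i ' '] = a.toList ∨ [PySem.List.pyGetD s (i + 1) ' '] = a.toList
        then acc ++ a.toList else acc ++ [PySem.List.pyGetD s (i + 1) ' ']) [] = pvStep a s := by
  have hsplit : (fun (acc : List Char) (i : Int) =>
      if [PySem.List.pyGetD s i ' '] = a.toList ∨ [PySem.List.pyGetD s (i + 1) ' '] = a.toList
      then acc ++ a.toList else acc ++ [PySem.List.pyGetD s (i + 1) ' ']) =
      (fun acc i => acc ++ (if [PySem.List.pyGetD s i ' '] = a.toList ∨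
          [PySem.List.pyGetD s (i + 1) ' '] = a.toList
        then a.toList else [PySem.List.pyGetD s (i + 1) ' '])) := by
    funext acc i; split <;> rfl
  rw [hsplit, pvFoldlChunk, List.nil_append, PySem.List.pyRange_one, List.flatMap_map]
  have htonat : ((s.length : Int) - 1 - 0).toNat = s.length - 1 := by omega
  rw [htonat, ← pvBridgeAux a s]
  apply List.flatMap_congr
  intro k _
  simp only [zero_add]
  have hk2 : ((k : Int) + 1) = (((k + 1 : Nat)) : Int) := by push_cast; ring
  rw [hk2, PySem.List.pyGetD_natCast, PySem.List.pyGetD_natCast]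

-- A, on S as a list of chars.  The indices handed to pyGetD lie in [0, len-2] ∪ [1, len-1],
-- always in range, so pyGetD is exact for Python's S[i] / S[i+1].  The `s = []` test only
-- makes the recursion total: Python recurses forever on "" (excluded by Pre_solve).
def solveAuxA (a : String) (s : List Char) (r : Int) : Int :=
  if (PySem.Set.ofList s).length = 1 then r
  else if h : s = [] then r
  else solveAuxA a
    ((PySem.List.pyRange 0 ((s.length : Int) - 1) 1).foldl
      (fun acc i =>
        if [PySem.List.pyGetD s i ' '] = a.toList ∨ [PySem.List.pyGetD s (i + 1) ' '] = a.toList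
        then acc ++ a.toList else acc ++ [PySem.List.pyGetD s (i + 1) ' ']) []) (r + 1)
termination_by s.length
decreasing_by
  simp only [dite_eq_ite]
  rw [pvBridge, pvStep_length]
  have : s.length ≠ 0 := fun h0 => h (List.eq_nil_of_length_eq_zero h0)
  omega

def solve (S : String) (a : String) (r : Int) : Int := solveAuxA a S.toList r

-- ===== PORT B =====
-- the while loop `while k > 0 and S[k-1] == S[k]: k -= 1`
def solveAltSuffix (s : List Char) (k : Int) : Int :=
  if h : 0 < k ∧ PySem.List.pyGetD s (k - 1) ' ' = PySem.List.pyGetD s k ' '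
  then solveAltSuffix s (k - 1) else k
termination_by k.toNat
decreasing_by omega

-- B's body on S as a list of chars; `match a.toList with | [c]` is Python's `len(a) == 1`,
-- `s.contains c` is `a in S` for a one-char a.
def solveAltCore (a : String) (s : List Char) (r : Int) : Int :=
  match a.toList with
  | [c] =>
    if s.contains c then
      r + ((s.foldl
        (fun (st : Nat × Nat) ch =>
          if ch = c then (st.1, 0)
          else ((if st.2 + 1 > st.1 then st.2 + 1 else st.1), st.2 + 1)) (0, 0)).1 : Int)
    else r + solveAltSuffix s ((s.length : Int) - 1)
  | _ => r + solveAltSuffix s ((s.length : Int) - 1)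

def solve_alt (S : String) (a : String) (r : Int) : Int := solveAltCore a S.toList r

-- ===== PRECONDITION & SPEC =====
-- Pre_ excludes only the empty string S (i.e. S = ""), on which A recurses forever
-- (Python RecursionError).
def Pre_solve (S : String) (a : String) (r : Int) : Prop := S.toList ≠ []
instance (S : String) (a : String) (r : Int) : Decidable (Pre_solve S a r) := by
  unfold Pre_solve; infer_instance

def pvWitness_solve : String × String × Int := ("abcb", "b", 0)

def Spec_solve (S : String) (a : String) (r : Int) (out : Int) : Prop := out = solve_alt S a r
instance (S : String) (a : String) (r : Int) (out : Int) : Decidable (Spec_solve S a r out) := by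
  unfold Spec_solve; infer_instance

-- ===== CLAIM (what is proved, stated in full; the proofs are below) =====
def Claim_equal_solve : Prop :=
  ∀ (S : String) (a : String) (r : Int), Dom_solve S a r → Pre_solve S a r →
    Spec_solve S a r (solve S a r)

-- ===== LEMMAS AND PROOFS =====

-- pvH c u l = longest run of non-c characters in l, counting a run of u non-c chars
-- immediately before l (the "cur" of B's fold, seen from the right)
def pvH (c : Char) : Nat → List Char → Nat
  | _, [] => 0
  | u, x :: t => if x = c then pvH c 0 t else max (u + 1) (pvH c (u + 1) t)

theorem pvRun_foldl (c : Char) (l : List Char) : ∀ (b u : Nat),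
    (l.foldl (fun (st : Nat × Nat) ch =>
      if ch = c then (st.1, 0)
      else ((if st.2 + 1 > st.1 then st.2 + 1 else st.1), st.2 + 1)) (b, u)).1
    = max b (pvH c u l) := by
  induction l with
  | nil => intro b u; simp [pvH]
  | cons x t ih =>
    intro b u
    by_cases hx : x = c
    · rw [List.foldl_cons, if_pos hx, ih]
      simp [pvH, hx]
    · rw [List.foldl_cons, if_neg hx, ih]
      simp only [pvH, if_neg hx]
      split_ifs <;> omega

theorem pvH_zero (c : Char) (s : List Char) (h : ∀ y ∈ s, y = c) : ∀ u, pvH c u s = 0 := by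
  induction s with
  | nil => intro u; rfl
  | cons x t ih =>
    intro u
    have hx : x = c := h x (by simp)
    simp only [pvH, if_pos hx]
    exact ih (fun y hy => h y (by simp [hy])) 0

theorem pvH_pos (c : Char) (s : List Char) (y : Char) (hy : y ∈ s) (hyc : y ≠ c) :
    ∀ u, 1 ≤ pvH c u s := by
  induction s with
  | nil => cases hy
  | cons x t ih =>
    intro u
    by_cases hx : x = c
    · have hyt : y ∈ t := by
        rcases List.mem_cons.1 hy with h | h
        · exact absurd (h.trans hx) hyc
        · exact h
      simp only [pvH, if_pos hx]
      exact ih hyt 0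
    · simp only [pvH, if_neg hx]
      omega

theorem pvH_step (a : String) (c : Char) (ha : a.toList = [c]) (t : List Char) :
    ∀ (x : Char) (u : Nat),
      pvH c u (pvStep a (x :: t)) = pvH c (if x = c then 0 else u + 1) t - 1 := by
  induction t with
  | nil => intro x u; simp [pvStep, pvH]
  | cons y t' ih =>
    intro x u
    have hhead : pvStep a (x :: y :: t') =
        (if x = c ∨ y = c then c else y) :: pvStep a (y :: t') := by
      simp [pvStep, ha, eq_comm]
    rw [hhead]
    by_cases hy : y = c
    · have hz : (if x = c ∨ y = c then c else y) = c := by simp [hy]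
      rw [hz]
      have h1 : pvH c u (c :: pvStep a (y :: t')) = pvH c 0 (pvStep a (y :: t')) := by
        simp [pvH]
      rw [h1, ih y 0, if_pos hy]
      have h2 : pvH c (if x = c then 0 else u + 1) (y :: t') = pvH c 0 t' := by
        simp [pvH, hy]
      rw [h2]
    · by_cases hx : x = c
      · have hz : (if x = c ∨ y = c then c else y) = c := by simp [hx]
        rw [hz]
        have h1 : pvH c u (c :: pvStep a (y :: t')) = pvH c 0 (pvStep a (y :: t')) := by
          simp [pvH]
        rw [h1, ih y 0, if_neg hy, if_pos hx]
        have h2 : pvH c 0 (y :: t') = max 1 (pvH c 1 t') := by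
          simp [pvH, hy]
        rw [h2]
        simp only [Nat.zero_add]
        omega
      · have hz : (if x = c ∨ y = c then c else y) = y := by simp [hx, hy]
        rw [hz]
        have h1 : pvH c u (y :: pvStep a (y :: t')) =
            max (u + 1) (pvH c (u + 1) (pvStep a (y :: t'))) := by
          simp [pvH, hy]
        rw [h1, ih y (u + 1), if_neg hy, if_neg hx]
        have h2 : pvH c (u + 1) (y :: t') = max (u + 1 + 1) (pvH c (u + 1 + 1) t') := by
          simp [pvH, hy]
        rw [h2]
        omega

theorem pvStep_mem (a : String) (c : Char) (ha : a.toList = [c]) :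
    ∀ (s : List Char), 2 ≤ s.length → c ∈ s → c ∈ pvStep a s := by
  intro s
  induction s with
  | nil => intro h; simp at h
  | cons x t ih =>
    intro hlen hc
    cases t with
    | nil => simp at hlen
    | cons y t' =>
      by_cases hcond : x = c ∨ y = c
      · have hcond' : [x] = a.toList ∨ [y] = a.toList := by
          rw [ha]; rcases hcond with h | h <;> simp [h]
        have hstep : pvStep a (x :: y :: t') = (a.toList.headD y) :: pvStep a (y :: t') := by
          simp [pvStep, hcond']
        rw [hstep, ha]
        simp
      · push_neg at hcond
        have hct : c ∈ y :: t' := by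
          rcases List.mem_cons.1 hc with h | h
          · exact absurd h.symm hcond.1
          · exact h
        have hlen2 : 2 ≤ (y :: t').length := by
          cases t' with
          | nil => simp at hct; exact absurd hct.symm hcond.2
          | cons _ _ => simp
        have hmem := ih hlen2 hct
        have hx' : ¬ ([x] = a.toList) := by
          rw [ha]; simp; exact fun h => hcond.1 h
        have hy' : ¬ ([y] = a.toList) := by
          rw [ha]; simp; exact fun h => hcond.2 h
        have hstep : pvStep a (x :: y :: t') = y :: pvStep a (y :: t') := by
          simp [pvStep, hx', hy']
        rw [hstep]
        exact List.mem_cons_of_mem y hmem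

theorem pvStep_eq_tail (a : String) : ∀ (s : List Char),
    (∀ z ∈ s, a.toList ≠ [z]) → pvStep a s = s.tail := by
  intro s
  induction s with
  | nil => intro _; rfl
  | cons x t ih =>
    intro h
    cases t with
    | nil => rfl
    | cons y t' =>
      have hx : ¬ ([x] = a.toList) := fun hh => h x (by simp) hh.symm
      have hy : ¬ ([y] = a.toList) := fun hh => h y (by simp) hh.symm
      have : pvStep a (x :: y :: t') = y :: pvStep a (y :: t') := by
        simp [pvStep, hx, hy]
      rw [this, ih (fun z hz => h z (by simp [hz]))]
      rfl

theorem suffix_zero (s : List Char) : solveAltSuffix s 0 = 0 := by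
  rw [solveAltSuffix]; simp

theorem suffix_succ (s : List Char) (k : Nat) :
    solveAltSuffix s ((k : Int) + 1) =
      if s.getD k ' ' = s.getD (k + 1) ' ' then solveAltSuffix s (k : Int) else (k : Int) + 1 := by
  rw [solveAltSuffix]
  have h1 : ((k : Int) + 1 - 1) = (k : Int) := by ring
  have h2 : ((k : Int) + 1) = (((k + 1 : Nat)) : Int) := by push_cast; ring
  rw [h1, h2, PySem.List.pyGetD_natCast, PySem.List.pyGetD_natCast]
  have hpos : (0 : Int) < (((k + 1 : Nat)) : Int) := by positivity
  by_cases hc : s.getD k ' ' = s.getD (k + 1) ' '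
  · rw [dif_pos ⟨hpos, hc⟩, if_pos hc]
  · rw [dif_neg (fun h => hc h.2), if_neg hc, ← h2]

theorem suffix_all_of_zero (s : List Char) : ∀ (k : Nat), k < s.length →
    solveAltSuffix s (k : Int) = 0 → ∀ j ≤ k, s.getD j ' ' = s.getD 0 ' ' := by
  intro k
  induction k with
  | zero => intro _ _ j hj; interval_cases j; rfl
  | succ k ih =>
    intro hk h0 j hj
    rw [show ((k + 1 : Nat) : Int) = (k : Int) + 1 from by push_cast; ring, suffix_succ] at h0
    by_cases hadj : s.getD k ' ' = s.getD (k + 1) ' '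
    · rw [if_pos hadj] at h0
      rcases Nat.lt_or_ge j (k + 1) with hj' | hj'
      · exact ih (by omega) h0 j (by omega)
      · have hjk : j = k + 1 := by omega
        rw [hjk, ← hadj]
        exact ih (by omega) h0 k le_rfl
    · rw [if_neg hadj] at h0
      exfalso; omega

theorem suffix_zero_of_all (s : List Char) (hall : ∀ y ∈ s, y = s.getD 0 ' ') :
    ∀ (k : Nat), k < s.length → solveAltSuffix s (k : Int) = 0 := by
  intro k
  induction k with
  | zero => intro _; exact suffix_zero s
  | succ k ih =>
    intro hk
    rw [show ((k + 1 : Nat) : Int) = (k : Int) + 1 from by push_cast; ring, suffix_succ]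
    have hgk : s.getD k ' ' = s.getD 0 ' ' := by
      rw [List.getD_eq_getElem?_getD, List.getElem?_eq_getElem (by omega)]
      exact hall _ (List.getElem_mem _)
    have hgk1 : s.getD (k + 1) ' ' = s.getD 0 ' ' := by
      rw [List.getD_eq_getElem?_getD, List.getElem?_eq_getElem (by omega)]
      exact hall _ (List.getElem_mem _)
    rw [if_pos (hgk.trans hgk1.symm)]
    exact ih (by omega)

theorem suffix_step (x : Char) (t : List Char) : ∀ (k : Nat),
    solveAltSuffix (x :: t) ((k : Int) + 1) =
      if solveAltSuffix t (k : Int) = 0 ∧ x = t.getD 0 ' '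
      then 0 else solveAltSuffix t (k : Int) + 1 := by
  intro k
  induction k with
  | zero =>
    rw [show ((0 : Nat) : Int) + 1 = ((0 : Nat) : Int) + 1 from rfl, suffix_succ]
    simp only [List.getD_cons_zero, List.getD_cons_succ, Nat.cast_zero, suffix_zero]
    by_cases hx : x = t.getD 0 ' '
    · simp [hx]
    · simp only [if_neg hx]
      split
      · next h => exact absurd h.2 hx
      · rfl
  | succ k ih =>
    rw [show ((k + 1 : Nat) : Int) + 1 = ((k + 1 : Nat) : Int) + 1 from rfl]
    rw [suffix_succ (x :: t) (k + 1)]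
    simp only [List.getD_cons_succ]
    rw [show ((k + 1 : Nat) : Int) = (k : Int) + 1 from by push_cast; ring]
    rw [suffix_succ t k]
    by_cases hadj : t.getD k ' ' = t.getD (k + 1) ' '
    · rw [if_pos hadj, if_pos hadj, ih]
    · rw [if_neg hadj, if_neg hadj]
      have : ¬ ((k : Int) + 1 = 0 ∧ x = t.getD 0 ' ') := by
        rintro ⟨h, _⟩; omega
      rw [if_neg this]

theorem setlen_one_iff (s : List Char) (hne : s ≠ []) :
    (PySem.Set.ofList s).length = 1 ↔ ∀ y ∈ s, y = s.getD 0 ' ' := by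
  constructor
  · intro h1 y hy
    obtain ⟨z, hz⟩ : ∃ z, PySem.Set.ofList s = [z] := by
      cases hof : PySem.Set.ofList s with
      | nil => rw [hof] at h1; simp at h1
      | cons w t =>
        rw [hof] at h1
        simp at h1
        exact ⟨w, by rw [h1]⟩
    have hmem : ∀ w ∈ s, w = z := by
      intro w hw
      have : w ∈ PySem.Set.ofList s := (PySem.Set.mem_ofList _ _).2 hw
      rw [hz] at this
      simpa using this
    obtain ⟨x, t, rfl⟩ := List.exists_cons_of_ne_nil hne
    rw [List.getD_cons_zero, hmem y hy, hmem x (by simp)]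
  · intro hall
    obtain ⟨x, t, rfl⟩ := List.exists_cons_of_ne_nil hne
    have hx : ∀ y ∈ x :: t, y = x := by
      intro y hy
      rw [hall y hy, List.getD_cons_zero]
    have hsub : ∀ y ∈ PySem.Set.ofList (x :: t), y = x :=
      fun y hy => hx y ((PySem.Set.mem_ofList _ _).1 hy)
    have hxmem : x ∈ PySem.Set.ofList (x :: t) := (PySem.Set.mem_ofList _ _).2 (by simp)
    have hnd : (PySem.Set.ofList (x :: t)).Nodup := PySem.Set.nodup_ofList _
    cases hof : PySem.Set.ofList (x :: t) with
    | nil => rw [hof] at hxmem; cases hxmem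
    | cons w t' =>
      cases t' with
      | nil => simp
      | cons w2 t'' =>
        rw [hof] at hsub hnd
        have h1 : w = x := hsub w (by simp)
        have h2 : w2 = x := hsub w2 (by simp)
        rw [h1, h2] at hnd
        simp at hnd

theorem pvSuffixBranch (a : String) (x : Char) (t : List Char)
    (hzs : ∀ z ∈ x :: t, a.toList ≠ [z])
    (h2 : 2 ≤ (x :: t).length)
    (hnall : ¬ ∀ y ∈ x :: t, y = (x :: t).getD 0 ' ') (r : Int) :
    (r + 1) + solveAltSuffix (pvStep a (x :: t)) (((pvStep a (x :: t)).length : Int) - 1) =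
      r + solveAltSuffix (x :: t) (((x :: t).length : Int) - 1) := by
  have ht : pvStep a (x :: t) = t := pvStep_eq_tail a _ hzs
  rw [ht]
  have htne : t ≠ [] := by
    intro h0; rw [h0] at h2; simp at h2
  obtain ⟨k, hkk⟩ : ∃ k : Nat, t.length = k + 1 :=
    ⟨t.length - 1, by have := List.length_pos_of_ne_nil htne; omega⟩
  have hlent : ((t.length : Int) - 1) = (k : Int) := by omega
  have hlens : (((x :: t).length : Int) - 1) = (k : Int) + 1 := by
    simp [hkk]
  rw [hlent, hlens, suffix_step x t k]
  have hcond : ¬ (solveAltSuffix t (k : Int) = 0 ∧ x = t.getD 0 ' ') := by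
    rintro ⟨hz0, hx0⟩
    apply hnall
    have hzero : solveAltSuffix (x :: t) ((k : Int) + 1) = 0 := by
      rw [suffix_step x t k, if_pos ⟨hz0, hx0⟩]
    have hall' := suffix_all_of_zero (x :: t) (k + 1)
      (by simp [hkk]) (by rw [show ((k + 1 : Nat) : Int) = (k : Int) + 1 from by
        push_cast; ring]; exact hzero)
    intro y hy
    obtain ⟨j, hj, hjy⟩ := List.mem_iff_getElem.1 hy
    have hjb : j ≤ k + 1 := by simp [hkk] at hj; omega
    have hgj := hall' j hjb
    rw [List.getD_eq_getElem?_getD, List.getElem?_eq_getElem hj] at hgj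
    simp at hgj
    rw [List.getD_cons_zero, ← hjy, hgj]
  rw [if_neg hcond]
  ring

theorem solve_main (a : String) :
    ∀ (n : Nat) (s : List Char), s.length ≤ n → s ≠ [] → ∀ r : Int,
      solveAuxA a s r = solveAltCore a s r := by
  intro n
  induction n with
  | zero =>
    intro s hlen hne
    exact absurd (List.eq_nil_of_length_eq_zero (Nat.le_zero.1 hlen)) hne
  | succ n ih =>
    intro s hlen hne r
    rw [solveAuxA]
    by_cases hset : (PySem.Set.ofList s).length = 1
    · rw [if_pos hset]
      have hall : ∀ y ∈ s, y = s.getD 0 ' ' := (setlen_one_iff s hne).1 hset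
      have hlenpos : 0 < s.length := List.length_pos_of_ne_nil hne
      have hsufz : solveAltSuffix s ((s.length : Int) - 1) = 0 := by
        rw [show ((s.length : Int) - 1) = ((s.length - 1 : Nat) : Int) from by omega]
        exact suffix_zero_of_all s hall (s.length - 1) (by omega)
      unfold solveAltCore
      rcases hlist : a.toList with _ | ⟨c, _ | ⟨d, rest⟩⟩
      · simp [hsufz]
      · by_cases hc : s.contains c
        · simp only [if_pos hc]
          have hcs : c ∈ s := by simpa using hc
          have hallc : ∀ y ∈ s, y = c := by
            intro y hy
            rw [hall y hy, ← hall c hcs]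
          rw [pvRun_foldl, pvH_zero c s hallc 0]
          simp
        · simp only [if_neg hc, hsufz, add_zero]
      · simp [hsufz]
    · rw [if_neg hset, dif_neg hne, pvBridge]
      have hnall : ¬ ∀ y ∈ s, y = s.getD 0 ' ' := fun h => hset ((setlen_one_iff s hne).2 h)
      have h2 : 2 ≤ s.length := by
        rcases s with _ | ⟨x, _ | ⟨y, t⟩⟩
        · exact absurd rfl hne
        · exact absurd ((setlen_one_iff _ hne).2 (by simp)) hset
        · simp
      have hTlen : (pvStep a s).length = s.length - 1 := pvStep_length a s
      have hTne : pvStep a s ≠ [] := by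
        intro h0; rw [h0] at hTlen; simp at hTlen; omega
      rw [ih (pvStep a s) (by omega) hTne (r + 1)]
      -- now: B on the rewritten string, one step later, equals B on s
      obtain ⟨x, t, rfl⟩ := List.exists_cons_of_ne_nil hne
      unfold solveAltCore
      rcases hlist : a.toList with _ | ⟨c, _ | ⟨d, rest⟩⟩
      · -- a is the empty string: never matches, every pass shifts left
        exact pvSuffixBranch a x t (by intro z _; rw [hlist]; simp) h2 hnall r
      · -- a is a single character c
        by_cases hc : (x :: t).contains c
        · have hcs : c ∈ x :: t := by simpa using hc
          have hcT : c ∈ pvStep a (x :: t) := pvStep_mem a c hlist _ h2 hcs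
          have hcT' : (pvStep a (x :: t)).contains c := by simpa using hcT
          simp only [if_pos hcT', if_pos hc]
          rw [pvRun_foldl, pvRun_foldl]
          rw [pvH_step a c hlist t x 0]
          have hpos : 1 ≤ pvH c 0 (x :: t) := by
            by_cases hx : x = c
            · obtain ⟨y, hy, hyx⟩ : ∃ y ∈ x :: t, y ≠ x := by
                by_contra hcon
                push_neg at hcon
                exact hnall (fun y hy => by rw [hcon y hy, List.getD_cons_zero])
              have hyt : y ∈ t := by
                rcases List.mem_cons.1 hy with h | h
                · exact absurd h hyx
                · exact h
              simp only [pvH, if_pos hx]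
              exact pvH_pos c t y hyt (by rw [← hx]; exact hyx) 0
            · simp only [pvH, if_neg hx]; omega
          by_cases hx : x = c
          · simp only [if_pos hx]
            simp only [pvH, if_pos hx] at hpos ⊢
            omega
          · simp only [if_neg hx]
            simp only [pvH, if_neg hx] at hpos ⊢
            simp only [Nat.zero_add]
            omega
        · -- c does not occur in s: every pass shifts left
          have hzs : ∀ z ∈ x :: t, a.toList ≠ [z] := by
            intro z hz hc2
            rw [hlist] at hc2
            have hcz : c = z := by simpa using hc2
            rw [hcz] at hc
            simp [hz] at hc
          have hcT : ¬ (pvStep a (x :: t)).contains c := by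
            rw [pvStep_eq_tail a _ hzs]
            intro hcc
            have : c ∈ x :: t := List.mem_cons_of_mem x (by simpa using hcc)
            simp [this] at hc
          simp only [if_neg hcT, if_neg hc]
          exact pvSuffixBranch a x t hzs h2 hnall r
      · -- a has length ≥ 2: never matches a single character
        exact pvSuffixBranch a x t (by intro z _; rw [hlist]; simp) h2 hnall r

-- ===== VERDICT (by name: the statement is the Claim_ definition above) =====
theorem solve_spec : Claim_equal_solve := by
  intro S a r _ hpre
  unfold Spec_solve solve solve_alt
  exact solve_main a S.toList.length S.toList le_rfl hpre r
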